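-- pv_equiv track=rewrite | github.com/Lightblues/Leetcode | 101-algorithm/DP-动态规划/dp.py | canDistribute
-- ===== SOURCE A (Python) =====
-- from typing import List, Optional, Tuple
-- import collections
--
-- def canDistribute(nums: List[int], quantity: List[int]) -> bool:
--     nums = list(collections.Counter(nums).values())
--     # 预先计算所有子集的需求和
--     n = len(quantity)
--     sums = [0] *  (1<<n)
--     for i, num in enumerate(quantity):
--         pre = 1<<i
--         for j in range(pre):
--             sums[pre+j] = sums[j] + num
--     # 子集枚举DP
--     m = len(nums)
--     dp = [[False] * (1<<n) for _ in range(m+1)]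
--     dp[0][0] = True
--     for i in range(1, m+1):
--         dp[i][0] = True
--         for mask in range(1, 1<<n):
--             # 注意这一行!! 假如前 i-1 个数字已经可以满足, 就不用再检查了
--             # 实际上根本的原因在于, 下面遍历的subset没有考虑到 subset=0 的情况.
--             if dp[i-1][mask]:
--                 dp[i][mask] = True
--                 continue
--             # 只有在 前 i-1 个数字无法满足的情况下, 才遍历所有子集
--             subset = mask
--             while subset:
--                 if sums[subset] <= nums[i-1] and dp[i-1][mask ^ subset]:
--                     dp[i][mask] = True
--                     break
--                 subset = (subset - 1) & mask
--     return dp[m][(1<<n)-1]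
-- ===== SOURCE B (Python) =====
-- import collections
--
-- def canDistribute(nums, quantity):
--     counts = list(collections.Counter(nums).values())
--     n = len(quantity)
--     full = (1 << n) - 1
--
--     def subsum(sub):
--         total = 0
--         for i in range(n):
--             if (sub >> i) & 1:
--                 total += quantity[i]
--         return total
--
--     reach = {0}
--     for c in counts:
--         new = set(reach)
--         for mask in reach:
--             free = full ^ mask
--             sub = free
--             while sub:
--                 if subsum(sub) <= c:
--                     new.add(mask | sub)
--                 sub = (sub - 1) & free
--         reach = new
--     return full in reach
-- ===== Notes on version B (the rewrite author's own statement) =====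
-- stated objective: alternative
-- what changed: Replaces the dense bins-by-masks DP table with its precomputed subset-sum array by a forward-growing frontier: a set of already-satisfiable customer masks, extended bin by bin with subset sums computed on the fly; the answer is membership of the full mask in the final frontier.
import Mathlib
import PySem

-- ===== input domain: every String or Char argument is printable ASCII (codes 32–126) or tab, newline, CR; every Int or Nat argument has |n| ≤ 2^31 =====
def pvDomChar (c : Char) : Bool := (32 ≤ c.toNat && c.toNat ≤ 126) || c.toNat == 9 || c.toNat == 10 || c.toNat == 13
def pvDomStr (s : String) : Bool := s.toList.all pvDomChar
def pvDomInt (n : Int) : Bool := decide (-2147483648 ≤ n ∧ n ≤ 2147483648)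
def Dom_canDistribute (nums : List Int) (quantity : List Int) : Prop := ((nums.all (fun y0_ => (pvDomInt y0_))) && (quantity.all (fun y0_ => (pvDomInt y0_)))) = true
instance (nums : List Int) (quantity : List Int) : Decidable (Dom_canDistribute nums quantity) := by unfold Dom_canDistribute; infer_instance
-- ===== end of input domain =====

-- B replaces the dense bins×masks DP table (and precomputed subset-sum array) by a forward
-- frontier set of satisfiable masks, extended bin by bin with subset sums computed on the fly
-- (objective: alternative; same exact result).

-- ===== PORT A =====
-- counts = list(collections.Counter(nums).values())  (shared by both Pythons)
def pvCounts (nums : List Int) : List Int := (PySem.Dict.counter nums).values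

-- sums = [0]*(1<<n); for i, num in enumerate(quantity): pre = 1<<i; for j in range(pre): sums[pre+j] = sums[j] + num
def pvSums (quantity : List Int) : List Int :=
  (PySem.List.enumerate quantity).foldl
    (fun sums p =>
      (List.range (1 <<< p.1.toNat)).foldl
        (fun s j => s.set (1 <<< p.1.toNat + j) (s.getD j 0 + p.2)) sums)
    (List.replicate (1 <<< quantity.length) 0)

-- subset = mask; while subset: if sums[subset] <= nums[i-1] and dp[i-1][mask ^ subset]: True; break
--                              subset = (subset - 1) & mask
def pvWhile (sums : List Int) (prev : List Bool) (c : Int) (mask : Nat) (subset : Nat) : Bool :=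
  if subset = 0 then false
  else if sums.getD subset 0 ≤ c && prev.getD (mask ^^^ subset) false then true
  else pvWhile sums prev c mask ((subset - 1) &&& mask)
termination_by subset
decreasing_by
  have h1 : (subset - 1) &&& mask ≤ subset - 1 := Nat.and_le_left
  omega

-- dp[i][0] = True; for mask in range(1, 1<<n): if dp[i-1][mask]: dp[i][mask] = True else inner while
def pvRow (sums : List Int) (c : Int) (n : Nat) (prev : List Bool) : List Bool :=
  (List.range' 1 (1 <<< n - 1)).foldl
    (fun row mask =>
      if prev.getD mask false then row.set mask true
      else if pvWhile sums prev c mask mask then row.set mask true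
      else row)
    ((List.replicate (1 <<< n) false).set 0 true)

def canDistribute (nums : List Int) (quantity : List Int) : Bool :=
  let counts := pvCounts nums
  let n := quantity.length
  let sums := pvSums quantity
  let dpLast := counts.foldl (fun prev c => pvRow sums c n prev)
    ((List.replicate (1 <<< n) false).set 0 true)
  dpLast.getD (1 <<< n - 1) false

-- ===== PORT B =====
-- def subsum(sub): total = 0; for i in range(n): if (sub >> i) & 1: total += quantity[i]; return total <= c
def altFits (quantity : List Int) (sub : Nat) (c : Int) : Bool :=
  decide (((List.range quantity.length).foldl
    (fun total i => if (sub >>> i) &&& 1 = 1 then total + quantity.getD i 0 else total) 0) ≤ c)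

-- sub = free; while sub: if subsum(sub) <= c: new.add(mask | sub); sub = (sub - 1) & free
def altWhile (quantity : List Int) (c : Int) (mask free : Nat) (neu : PySem.Set Nat) (sub : Nat) : PySem.Set Nat :=
  if sub = 0 then neu
  else altWhile quantity c mask free
        (if altFits quantity sub c then PySem.Set.add neu (mask ||| sub) else neu)
        ((sub - 1) &&& free)
termination_by sub
decreasing_by
  have h1 : (sub - 1) &&& free ≤ sub - 1 := Nat.and_le_left
  omega

-- new = set(reach); for mask in reach: free = full ^ mask; inner while loop
def altStep (quantity : List Int) (full : Nat) (c : Int) (reach : PySem.Set Nat) : PySem.Set Nat :=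
  reach.foldl (fun neu mask => altWhile quantity c mask (full ^^^ mask) neu (full ^^^ mask)) reach

def canDistribute_alt (nums : List Int) (quantity : List Int) : Bool :=
  let counts := pvCounts nums
  let n := quantity.length
  let full := 1 <<< n - 1
  let reach := counts.foldl (fun reach c => altStep quantity full c reach)
    (PySem.Set.add PySem.Set.empty 0)
  PySem.Set.contains reach full

-- ===== PRECONDITION & SPEC =====
def Spec_canDistribute (nums : List Int) (quantity : List Int) (out : Bool) : Prop := out = canDistribute_alt nums quantity
instance (nums : List Int) (quantity : List Int) (out : Bool) : Decidable (Spec_canDistribute nums quantity out) := by unfold Spec_canDistribute; infer_instance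

-- ===== CLAIM (what is proved, stated in full; the proofs are below) =====
def Claim_equal_canDistribute : Prop := ∀ (nums : List Int) (quantity : List Int), Dom_canDistribute nums quantity → Spec_canDistribute nums quantity (canDistribute nums quantity)

-- ===== LEMMAS AND PROOFS =====

-- ---- bit arithmetic ----
lemma pv_and_div2 (a b : Nat) : (a &&& b) / 2 = (a / 2) &&& (b / 2) := by
  apply Nat.eq_of_testBit_eq
  intro i
  simp [Nat.testBit_div_two, Nat.testBit_and]

lemma pv_and_mod2 (a b : Nat) : (a &&& b) % 2 = (a % 2) * (b % 2) := by
  have h := Nat.testBit_and a b 0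
  simp only [Nat.testBit_zero] at h
  rcases Nat.mod_two_eq_zero_or_one a with ha | ha <;>
    rcases Nat.mod_two_eq_zero_or_one b with hb | hb <;>
    rcases Nat.mod_two_eq_zero_or_one (a &&& b) with hc | hc <;>
    simp [ha, hb, hc] at h ⊢ <;> omega

lemma pv_and_decomp (a b : Nat) : a &&& b = 2 * ((a / 2) &&& (b / 2)) + (a % 2) * (b % 2) := by
  have h1 := pv_and_div2 a b
  have h2 := pv_and_mod2 a b
  omega

-- max-submask property of the standard (s-1)&mask submask enumeration step
lemma pv_submask_step (s : Nat) : ∀ t mask : Nat, s &&& mask = s → t &&& mask = t → t < s →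
    t ≤ (s - 1) &&& mask := by
  induction s using Nat.strong_induction_on with
  | _ s ih =>
    intro t mask hs ht hts
    have hA := pv_and_decomp s mask
    have hB := pv_and_decomp t mask
    have hC := pv_and_decomp (s - 1) mask
    rw [hs] at hA
    rw [ht] at hB
    rcases Nat.mod_two_eq_zero_or_one s with hp | hp
    · -- s even; s ≠ 0 since t < s
      have hsne : s ≠ 0 := by omega
      have he1 : (s - 1) % 2 = 1 := by omega
      have he2 : (s - 1) / 2 = s / 2 - 1 := by omega
      rw [hp, Nat.zero_mul, Nat.add_zero] at hA
      rw [he1, he2, Nat.one_mul] at hC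
      have hs2 : s / 2 &&& mask / 2 = s / 2 := by omega
      have ht2 : t / 2 &&& mask / 2 = t / 2 := by
        rcases Nat.mod_two_eq_zero_or_one t with hq | hq <;>
          rcases Nat.mod_two_eq_zero_or_one mask with hm | hm <;>
          rw [hq, hm] at hB <;> omega
      have htm : t % 2 ≤ mask % 2 := by
        rcases Nat.mod_two_eq_zero_or_one t with hq | hq <;>
          rcases Nat.mod_two_eq_zero_or_one mask with hm | hm <;>
          rw [hq, hm] at hB <;> omega
      have hIH := ih (s / 2) (by omega) (t / 2) (mask / 2) hs2 ht2 (by omega)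
      omega
    · -- s odd : (s-1)&mask = s-1
      have he1 : (s - 1) % 2 = 0 := by omega
      have he2 : (s - 1) / 2 = s / 2 := by omega
      rcases Nat.mod_two_eq_zero_or_one mask with hm | hm
      · rw [hp, hm] at hA; omega
      · rw [hp, hm] at hA
        rw [he1, he2, Nat.zero_mul, Nat.add_zero] at hC
        omega

lemma pv_and_idem_right (x mask : Nat) : (x &&& mask) &&& mask = x &&& mask := by
  rw [Nat.and_assoc, Nat.and_self]

lemma pv_submask_iff {a b : Nat} : a &&& b = a ↔ ∀ i, a.testBit i = true → b.testBit i = true := by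
  constructor
  · intro h i hi
    have h2 : (a &&& b).testBit i = a.testBit i := by rw [h]
    rw [Nat.testBit_and, hi] at h2
    simpa using h2
  · intro h
    apply Nat.eq_of_testBit_eq
    intro i
    rw [Nat.testBit_and]
    cases ha : a.testBit i
    · simp
    · simp [h i ha]

lemma pv_testBit_lt_of_lt_two_pow {x n i : Nat} (h : x < 2 ^ n) (hb : x.testBit i = true) : i < n := by
  by_contra hc
  push_neg at hc
  have : x < 2 ^ i := lt_of_lt_of_le h (Nat.pow_le_pow_right (by norm_num) hc)
  rw [Nat.testBit_lt_two_pow this] at hb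
  exact absurd hb (by simp)

lemma pv_lt_two_pow_of_bits {x n : Nat} (h : ∀ i, x.testBit i = true → i < n) : x < 2 ^ n := by
  have : x % 2 ^ n = x := by
    apply Nat.eq_of_testBit_eq
    intro i
    rw [Nat.testBit_mod_two_pow]
    cases hx : x.testBit i
    · simp
    · simp [h i hx]
  calc x = x % 2 ^ n := this.symm
    _ < 2 ^ n := Nat.mod_lt _ (Nat.two_pow_pos _)

-- ---- small getD/set helpers ----
lemma pv_getD_set_self {A : Type} (l : List A) (i : Nat) (a d : A) (h : i < l.length) :
    (l.set i a).getD i d = a := by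
  rw [List.getD_eq_getElem?_getD, List.getElem?_set_self h]
  rfl

lemma pv_getD_set_ne {A : Type} (l : List A) (i j : Nat) (a d : A) (h : i ≠ j) :
    (l.set i a).getD j d = l.getD j d := by
  rw [List.getD_eq_getElem?_getD, List.getElem?_set_ne h, ← List.getD_eq_getElem?_getD]

lemma pv_getD_replicate {A : Type} (n j : Nat) (a : A) :
    (List.replicate n a).getD j a = a := by
  rw [List.getD_eq_getElem?_getD, List.getElem?_replicate]
  split <;> rfl

-- ---- the while-loop enumerates exactly the nonzero submasks ≤ start ----
lemma pvWhile_iff (sums : List Int) (prev : List Bool) (c : Int) (mask : Nat) :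
    ∀ sub, sub &&& mask = sub →
      (pvWhile sums prev c mask sub = true ↔
        ∃ s, s ≠ 0 ∧ s &&& mask = s ∧ s ≤ sub ∧
          (sums.getD s 0 ≤ c ∧ prev.getD (mask ^^^ s) false = true)) := by
  intro sub
  induction sub using Nat.strong_induction_on with
  | _ sub ih =>
    intro hsub
    rw [pvWhile]
    by_cases h0 : sub = 0
    · subst h0
      rw [if_pos rfl]
      constructor
      · intro h; exact absurd h (by simp)
      · rintro ⟨s, hs0, _, hle, _⟩; omega
    · rw [if_neg h0]
      by_cases hc : (decide (sums.getD sub 0 ≤ c) && prev.getD (mask ^^^ sub) false) = true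
      · rw [if_pos hc]
        simp only [Bool.and_eq_true, decide_eq_true_eq] at hc
        constructor
        · intro _; exact ⟨sub, h0, hsub, le_refl _, hc.1, hc.2⟩
        · intro _; rfl
      · rw [if_neg hc]
        have hnx : ((sub - 1) &&& mask) &&& mask = (sub - 1) &&& mask := pv_and_idem_right _ _
        have hand : (sub - 1) &&& mask ≤ sub - 1 := Nat.and_le_left
        have hlt : (sub - 1) &&& mask < sub := by omega
        rw [ih _ hlt hnx]
        simp only [Bool.and_eq_true, decide_eq_true_eq, not_and] at hc
        constructor
        · rintro ⟨s, hs0, hsm, hle, hy⟩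
          exact ⟨s, hs0, hsm, by omega, hy⟩
        · rintro ⟨s, hs0, hsm, hle, hy⟩
          refine ⟨s, hs0, hsm, ?_, hy⟩
          rcases Nat.lt_or_ge s sub with hlt2 | hge
          · exact pv_submask_step sub s mask hsub hsm hlt2
          · have hes : s = sub := le_antisymm hle hge
            subst hes
            exact absurd hy.2 (hc hy.1)

lemma altWhile_mem (quantity : List Int) (c : Int) (mask free : Nat) :
    ∀ sub neu x, sub &&& free = sub →
      (x ∈ altWhile quantity c mask free neu sub ↔
        x ∈ neu ∨ ∃ s, s ≠ 0 ∧ s &&& free = s ∧ s ≤ sub ∧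
          altFits quantity s c = true ∧ x = mask ||| s) := by
  intro sub
  induction sub using Nat.strong_induction_on with
  | _ sub ih =>
    intro neu x hsub
    rw [altWhile]
    by_cases h0 : sub = 0
    · subst h0
      rw [if_pos rfl]
      constructor
      · intro h; exact Or.inl h
      · rintro (h | ⟨s, hs0, _, hle, _⟩)
        · exact h
        · omega
    · rw [if_neg h0]
      have hnx : ((sub - 1) &&& free) &&& free = (sub - 1) &&& free := pv_and_idem_right _ _
      have hand : (sub - 1) &&& free ≤ sub - 1 := Nat.and_le_left
      have hlt : (sub - 1) &&& free < sub := by omega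
      rw [ih _ hlt _ x hnx]
      by_cases hf : altFits quantity sub c = true
      · rw [if_pos hf, PySem.Set.mem_add]
        constructor
        · rintro ((h | h) | ⟨s, hs0, hsm, hle, hfit, hx⟩)
          · exact Or.inl h
          · exact Or.inr ⟨sub, h0, hsub, le_refl _, hf, h⟩
          · exact Or.inr ⟨s, hs0, hsm, by omega, hfit, hx⟩
        · rintro (h | ⟨s, hs0, hsm, hle, hfit, hx⟩)
          · exact Or.inl (Or.inl h)
          · rcases Nat.lt_or_ge s sub with h2 | h2
            · exact Or.inr ⟨s, hs0, hsm, pv_submask_step sub s free hsub hsm h2, hfit, hx⟩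
            · have hes : s = sub := le_antisymm hle h2
              subst hes
              exact Or.inl (Or.inr hx)
      · rw [if_neg hf]
        constructor
        · rintro (h | ⟨s, hs0, hsm, hle, hfit, hx⟩)
          · exact Or.inl h
          · exact Or.inr ⟨s, hs0, hsm, by omega, hfit, hx⟩
        · rintro (h | ⟨s, hs0, hsm, hle, hfit, hx⟩)
          · exact Or.inl h
          · rcases Nat.lt_or_ge s sub with h2 | h2
            · exact Or.inr ⟨s, hs0, hsm, pv_submask_step sub s free hsub hsm h2, hfit, hx⟩
            · have hes : s = sub := le_antisymm hle h2
              subst hes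
              exact absurd hfit hf

-- ---- generic fold-of-sets lemmas ----
lemma pv_foldl_set_true_length (f : Nat → Bool) :
    ∀ (l : List Nat) (r0 : List Bool),
      (l.foldl (fun row i => if f i then row.set i true else row) r0).length = r0.length := by
  intro l
  induction l with
  | nil => intro r0; rfl
  | cons i tl ih =>
    intro r0
    simp only [List.foldl_cons]
    rw [ih]
    split <;> simp

lemma pv_foldl_set_true_getD (f : Nat → Bool) :
    ∀ (l : List Nat) (r0 : List Bool), l.Nodup → (∀ i ∈ l, i < r0.length) → ∀ j,
      (l.foldl (fun row i => if f i then row.set i true else row) r0).getD j false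
        = (decide (j ∈ l) && f j || r0.getD j false) := by
  intro l
  induction l with
  | nil => intro r0 _ _ j; simp
  | cons i tl ih =>
    intro r0 hnd hlen j
    simp only [List.foldl_cons]
    have hi : i < r0.length := hlen i (by simp)
    have hnd' : tl.Nodup := (List.nodup_cons.mp hnd).2
    have hni : i ∉ tl := (List.nodup_cons.mp hnd).1
    have hlen' : ∀ k ∈ tl, k < (if f i then r0.set i true else r0).length := by
      intro k hk
      have := hlen k (by simp [hk])
      split <;> simpa
    rw [ih _ hnd' hlen' j]
    by_cases hji : j = i
    · subst hji
      rw [decide_eq_false hni]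
      cases hf : f j
      · rw [if_neg (by simp)]
        simp [hf]
      · rw [if_pos rfl, pv_getD_set_self _ _ _ _ hi]
        simp [hf]
    · cases hf : f i
      · rw [if_neg (by simp)]
        simp [hji]
      · rw [if_pos rfl, pv_getD_set_ne _ _ _ _ _ (fun h => hji h.symm)]
        simp [hji]

-- ---- subset sums ----
def sumQ (q : List Int) (s : Nat) : Int :=
  ∑ i ∈ Finset.range q.length, if s.testBit i then q.getD i 0 else 0

lemma pv_foldl_range_add (g : Nat → Int) :
    ∀ (n : Nat) (a : Int), (List.range n).foldl (fun t i => t + g i) a = a + ∑ i ∈ Finset.range n, g i := by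
  intro n
  induction n with
  | zero => simp
  | succ n ih =>
    intro a
    rw [List.range_succ, List.foldl_append, ih, Finset.sum_range_succ]
    simp [add_assoc]

lemma altFits_eq (quantity : List Int) (s : Nat) (c : Int) :
    altFits quantity s c = decide (sumQ quantity s ≤ c) := by
  unfold altFits sumQ
  have hcong : ∀ (t : Int) (i : Nat),
      (if (s >>> i) &&& 1 = 1 then t + quantity.getD i 0 else t)
        = t + (if s.testBit i then quantity.getD i 0 else 0) := by
    intro t i
    have hbit : ((s >>> i) &&& 1 = 1) = (s.testBit i = true) := by
      rw [Nat.and_one_is_mod, Nat.shiftRight_eq_div_pow, Nat.testBit_eq_decide_div_mod_eq]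
      simp
    simp only [hbit]
    cases h : s.testBit i <;> simp
  have hfold : (List.range quantity.length).foldl
        (fun total i => if (s >>> i) &&& 1 = 1 then total + quantity.getD i 0 else total) 0
      = ∑ i ∈ Finset.range quantity.length, (if s.testBit i then quantity.getD i 0 else 0) := by
    calc (List.range quantity.length).foldl
          (fun total i => if (s >>> i) &&& 1 = 1 then total + quantity.getD i 0 else total) 0
        = (List.range quantity.length).foldl
          (fun total i => total + (if s.testBit i then quantity.getD i 0 else 0)) 0 := by
          apply PySem.List.foldl_congr_mem
          intro acc x _
          exact hcong acc x
      _ = ∑ i ∈ Finset.range quantity.length, (if s.testBit i then quantity.getD i 0 else 0) := by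
          rw [pv_foldl_range_add]; simp
  rw [hfold]

lemma sumQ_two_pow_add (q : List Int) (k j : Nat) (hk : k < q.length) (hj : j < 2 ^ k) :
    sumQ q (2 ^ k + j) = sumQ q j + q.getD k 0 := by
  unfold sumQ
  have hsplit : ∀ i ∈ Finset.range q.length,
      (if (2 ^ k + j).testBit i then q.getD i 0 else 0)
        = (if j.testBit i then q.getD i 0 else 0) + (if i = k then q.getD k 0 else 0) := by
    intro i _
    rcases lt_trichotomy i k with h | h | h
    · rw [Nat.testBit_two_pow_add_gt h]
      simp [Nat.ne_of_lt h]
    · subst h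
      rw [Nat.testBit_two_pow_add_eq, Nat.testBit_lt_two_pow hj]
      simp
    · have hlt1 : 2 ^ k + j < 2 ^ i := by
        have h1 : 2 ^ k + j < 2 ^ (k + 1) := by
          have : (2:Nat) ^ (k+1) = 2 ^ k + 2 ^ k := by ring
          omega
        have h2 : (2:Nat) ^ (k + 1) ≤ 2 ^ i := Nat.pow_le_pow_right (by norm_num) h
        omega
      have h1 : (2 ^ k + j).testBit i = false := Nat.testBit_lt_two_pow hlt1
      have h2 : j.testBit i = false := Nat.testBit_lt_two_pow (by
        have : (2:Nat) ^ k ≤ 2 ^ i := Nat.pow_le_pow_right (by norm_num) (le_of_lt h)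
        omega)
      rw [h1, h2]
      simp [Nat.ne_of_gt h]
  rw [Finset.sum_congr rfl hsplit, Finset.sum_add_distrib]
  congr 1
  rw [Finset.sum_ite_eq' (Finset.range q.length) k (fun _ => q.getD k 0)]
  simp [Finset.mem_range.mpr hk]

lemma sumQ_zero (q : List Int) : sumQ q 0 = 0 := by
  unfold sumQ
  simp [Nat.zero_testBit]

lemma pv_sums_inner (x : Int) (pre : Nat) :
    ∀ (m : Nat) (S : List Int), m ≤ pre → pre + pre ≤ S.length →
      (((List.range m).foldl (fun s j => s.set (pre + j) (s.getD j 0 + x)) S).length = S.length ∧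
       ∀ t, ((List.range m).foldl (fun s j => s.set (pre + j) (s.getD j 0 + x)) S).getD t 0
         = if pre ≤ t ∧ t < pre + m then S.getD (t - pre) 0 + x else S.getD t 0) := by
  intro m
  induction m with
  | zero =>
    intro S _ _
    refine ⟨rfl, ?_⟩
    intro t
    rw [if_neg (by omega)]
    rfl
  | succ m ih =>
    intro S hm hlen
    obtain ⟨ihlen, ihgetD⟩ := ih S (by omega) hlen
    rw [List.range_succ, List.foldl_append, List.foldl_cons, List.foldl_nil]
    refine ⟨by rw [List.length_set, ihlen], ?_⟩
    intro t
    have hFm : ((List.range m).foldl (fun s j => s.set (pre + j) (s.getD j 0 + x)) S).getD m 0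
        = S.getD m 0 := by
      rw [ihgetD, if_neg (by omega)]
    by_cases ht : t = pre + m
    · subst ht
      rw [pv_getD_set_self _ _ _ _ (by rw [ihlen]; omega), hFm, if_pos ⟨by omega, by omega⟩]
      congr 2
      omega
    · rw [pv_getD_set_ne _ _ _ _ _ (fun h => ht h.symm), ihgetD]
      by_cases h2 : pre ≤ t ∧ t < pre + m
      · rw [if_pos h2, if_pos ⟨h2.1, by omega⟩]
      · rw [if_neg h2, if_neg (by omega)]

lemma pv_sums_go (q : List Int) :
    ∀ (tl : List Int) (k : Nat) (S : List Int),
      k + tl.length = q.length → tl = q.drop k → S.length = 2 ^ q.length →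
      (∀ j, j < 2 ^ k → S.getD j 0 = sumQ q j) →
      (∀ j, 2 ^ k ≤ j → S.getD j 0 = 0) →
      ∀ s, s < 2 ^ q.length →
        ((PySem.List.enumerate tl (k : Int)).foldl
          (fun sums p =>
            (List.range (1 <<< p.1.toNat)).foldl
              (fun s j => s.set (1 <<< p.1.toNat + j) (s.getD j 0 + p.2)) sums) S).getD s 0
          = sumQ q s := by
  intro tl
  induction tl with
  | nil =>
    intro k S hk _ _ h1 _ s hs
    rw [PySem.List.enumerate_nil, List.foldl_nil]
    have hkn : k = q.length := by simpa using hk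
    exact h1 s (by rw [hkn]; exact hs)
  | cons x tl ih =>
    intro k S hk hdrop hlen h1 h2 s hs
    rw [PySem.List.enumerate_cons, List.foldl_cons]
    have hklt : k < q.length := by
      simp only [List.length_cons] at hk
      omega
    have hxk : x = q.getD k 0 := by
      have hget : q[k]? = some x := by
        have h0 : (q.drop k)[0]? = some x := by rw [← hdrop]; rfl
        rw [List.getElem?_drop] at h0
        simpa using h0
      rw [List.getD_eq_getElem?_getD, hget]
      rfl
    have htn : ((k : Int)).toNat = k := Int.toNat_natCast k
    have hpow : (1 : Nat) <<< k = 2 ^ k := Nat.one_shiftLeft k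
    have hpre : 2 ^ k + 2 ^ k ≤ S.length := by
      rw [hlen]
      have hp : (2:Nat) ^ (k + 1) ≤ 2 ^ q.length := Nat.pow_le_pow_right (by norm_num) (by omega)
      have : (2:Nat) ^ (k+1) = 2 ^ k + 2 ^ k := by ring
      omega
    obtain ⟨hS1len, hS1⟩ := pv_sums_inner x (2 ^ k) (2 ^ k) S (le_refl _) hpre
    simp only [htn, hpow]
    have hstep : (k : Int) + 1 = ((k + 1 : Nat) : Int) := by push_cast; ring
    rw [hstep]
    refine ih (k + 1) _ (by simp only [List.length_cons] at hk; omega) ?_ ?_ ?_ ?_ s hs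
    · have hd1 : q.drop (k + 1) = (q.drop k).drop 1 := by
        rw [List.drop_drop]
      rw [hd1, ← hdrop]
      rfl
    · rw [hS1len, hlen]
    · intro j hj
      rw [hS1 j]
      by_cases hjk : j < 2 ^ k
      · rw [if_neg (by omega)]
        exact h1 j hjk
      · have hcond : 2 ^ k ≤ j ∧ j < 2 ^ k + 2 ^ k := by
          have : (2:Nat) ^ (k+1) = 2 ^ k + 2 ^ k := by ring
          omega
        rw [if_pos hcond, h1 (j - 2 ^ k) (by omega), hxk]
        conv_rhs => rw [show j = 2 ^ k + (j - 2 ^ k) by omega]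
        rw [sumQ_two_pow_add q k (j - 2 ^ k) hklt (by omega)]
    · intro j hj
      rw [hS1 j, if_neg (by
        have : (2:Nat) ^ (k+1) = 2 ^ k + 2 ^ k := by ring
        omega)]
      exact h2 j (by
        have h3 : (2:Nat) ^ k ≤ 2 ^ (k+1) := Nat.pow_le_pow_right (by norm_num) (by omega)
        omega)

lemma pvSums_getD (q : List Int) : ∀ s, s < 2 ^ q.length → (pvSums q).getD s 0 = sumQ q s := by
  intro s hs
  unfold pvSums
  have h0 : ((0 : Nat) : Int) = (0 : Int) := rfl
  have := pv_sums_go q q 0 (List.replicate (1 <<< q.length) 0)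
    (by omega) (by simp) (by rw [List.length_replicate, Nat.one_shiftLeft])
    (fun j hj => by
      have hj0 : j = 0 := by omega
      subst hj0
      rw [pv_getD_replicate, sumQ_zero])
    (fun j _ => pv_getD_replicate _ _ _)
    s hs
  simpa using this

-- ---- row characterization ----
lemma pvRow_eq_fold (sums : List Int) (c : Int) (n : Nat) (prev : List Bool) :
    pvRow sums c n prev =
      (List.range' 1 (1 <<< n - 1)).foldl
        (fun row mask =>
          if (prev.getD mask false || pvWhile sums prev c mask mask) then row.set mask true else row)
        ((List.replicate (1 <<< n) false).set 0 true) := by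
  unfold pvRow
  apply PySem.List.foldl_congr_mem
  intro row mask _
  cases h1 : prev.getD mask false
  · cases h2 : pvWhile sums prev c mask mask <;> simp [h1, h2]
  · simp [h1]

lemma pvRow_length (sums : List Int) (c : Int) (n : Nat) (prev : List Bool) :
    (pvRow sums c n prev).length = 2 ^ n := by
  rw [pvRow_eq_fold, pv_foldl_set_true_length, List.length_set, List.length_replicate,
    Nat.one_shiftLeft]

lemma pvRow_getD (sums : List Int) (c : Int) (n : Nat) (prev : List Bool) (j : Nat) :
    (pvRow sums c n prev).getD j false =
      if j = 0 then true
      else if 1 ≤ j ∧ j < 2 ^ n then (prev.getD j false || pvWhile sums prev c j j) else false := by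
  rw [pvRow_eq_fold]
  have hN : (1:Nat) <<< n = 2 ^ n := Nat.one_shiftLeft n
  have hpos : 0 < 2 ^ n := Nat.two_pow_pos n
  have hr0len : ((List.replicate (1 <<< n) false).set 0 true).length = 2 ^ n := by
    rw [List.length_set, List.length_replicate, hN]
  rw [pv_foldl_set_true_getD (fun mask => prev.getD mask false || pvWhile sums prev c mask mask)
      _ _ (List.nodup_range')
      (by intro i hi; rw [hr0len]; rw [List.mem_range'_1] at hi; omega) j]
  by_cases hj0 : j = 0
  · subst hj0
    rw [if_pos rfl]
    have hmem : (0:Nat) ∉ List.range' 1 (1 <<< n - 1) := by simp [List.mem_range'_1]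
    rw [decide_eq_false hmem, pv_getD_set_self _ _ _ _ (by rw [List.length_replicate, hN]; omega)]
    simp
  · rw [if_neg hj0]
    have hgd : ((List.replicate (1 <<< n) false).set 0 true).getD j false = false := by
      rw [pv_getD_set_ne _ _ _ _ _ (fun h => hj0 h.symm), pv_getD_replicate]
    rw [hgd]
    by_cases hjr : 1 ≤ j ∧ j < 2 ^ n
    · rw [if_pos hjr]
      have hmem : j ∈ List.range' 1 (1 <<< n - 1) := by
        rw [List.mem_range'_1, hN]
        omega
      rw [decide_eq_true hmem]
      simp
    · rw [if_neg hjr]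
      have hmem : j ∉ List.range' 1 (1 <<< n - 1) := by
        rw [List.mem_range'_1, hN]
        omega
      rw [decide_eq_false hmem]
      simp

-- ---- altStep characterization ----
lemma altStep_mem (quantity : List Int) (full : Nat) (c : Int) (reach : PySem.Set Nat) (x : Nat) :
    x ∈ altStep quantity full c reach ↔
      x ∈ reach ∨ ∃ mask ∈ reach, ∃ s, s ≠ 0 ∧ s &&& (full ^^^ mask) = s ∧
        altFits quantity s c = true ∧ x = mask ||| s := by
  unfold altStep
  suffices h : ∀ (l : List Nat) (neu : PySem.Set Nat),
      (x ∈ l.foldl (fun neu mask => altWhile quantity c mask (full ^^^ mask) neu (full ^^^ mask)) neu ↔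
        x ∈ neu ∨ ∃ mask ∈ l, ∃ s, s ≠ 0 ∧ s &&& (full ^^^ mask) = s ∧
          altFits quantity s c = true ∧ x = mask ||| s) by
    exact h reach reach
  intro l
  induction l with
  | nil => intro neu; simp
  | cons mask0 tl ih =>
    intro neu
    rw [List.foldl_cons, ih,
      altWhile_mem quantity c mask0 (full ^^^ mask0) (full ^^^ mask0) neu x (Nat.and_self _)]
    constructor
    · rintro ((h | ⟨s, hs0, hsm, hle, hf, hx⟩) | ⟨m, hm, rest⟩)
      · exact Or.inl h
      · exact Or.inr ⟨mask0, by simp, s, hs0, hsm, hf, hx⟩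
      · exact Or.inr ⟨m, by simp [hm], rest⟩
    · rintro (h | ⟨m, hm, s, hs0, hsm, hf, hx⟩)
      · exact Or.inl (Or.inl h)
      · rcases List.mem_cons.mp hm with heq | hm'
        · subst heq
          exact Or.inl (Or.inr ⟨s, hs0, hsm, (by rw [← hsm]; exact Nat.and_le_right), hf, hx⟩)
        · exact Or.inr ⟨m, hm', s, hs0, hsm, hf, hx⟩

-- ---- bridging the two recurrences ----
lemma pv_sub_le {s j : Nat} (h : s &&& j = s) : s ≤ j := by
  rw [← h]
  exact Nat.and_le_right

lemma pv_xor_lt {j s n : Nat} (hj : j < 2 ^ n) (hs : s &&& j = s) : j ^^^ s < 2 ^ n := by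
  apply pv_lt_two_pow_of_bits
  intro i hi
  rw [Nat.testBit_xor] at hi
  have hji : j.testBit i = true := by
    cases hsi : s.testBit i
    · cases hjb : j.testBit i
      · rw [hsi, hjb] at hi
        simp at hi
      · rfl
    · exact (pv_submask_iff.mp hs) i hsi
  exact pv_testBit_lt_of_lt_two_pow hj hji

lemma pv_bridge (quantity : List Int) (c : Int) (n : Nat) (reach : List Nat)
    (hr : ∀ x ∈ reach, x < 2 ^ n) (j : Nat) (hj : j < 2 ^ n) :
    ((∃ s, s ≠ 0 ∧ s &&& j = s ∧ sumQ quantity s ≤ c ∧ (j ^^^ s) ∈ reach)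
      ↔ (∃ mask ∈ reach, ∃ s, s ≠ 0 ∧ s &&& ((2 ^ n - 1) ^^^ mask) = s ∧
          sumQ quantity s ≤ c ∧ j = mask ||| s)) := by
  constructor
  · rintro ⟨s, hs0, hsj, hsum, hmem⟩
    refine ⟨j ^^^ s, hmem, s, hs0, ?_, hsum, ?_⟩
    · rw [pv_submask_iff]
      intro i hi
      have hji : j.testBit i = true := (pv_submask_iff.mp hsj) i hi
      have hin : i < n := pv_testBit_lt_of_lt_two_pow hj hji
      rw [Nat.testBit_xor, Nat.testBit_xor, Nat.testBit_two_pow_sub_one, hji, hi]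
      simp [hin]
    · apply Nat.eq_of_testBit_eq
      intro i
      rw [Nat.testBit_or, Nat.testBit_xor]
      cases hsi : s.testBit i
      · simp
      · have hji := (pv_submask_iff.mp hsj) i hsi
        simp [hji]
  · rintro ⟨mask, hm, s, hs0, hsf, hsum, hx⟩
    have hmaskN : mask < 2 ^ n := hr mask hm
    have hdisj : ∀ i, s.testBit i = true → mask.testBit i = false := by
      intro i hi
      have h1 := (pv_submask_iff.mp hsf) i hi
      rw [Nat.testBit_xor, Nat.testBit_two_pow_sub_one] at h1
      by_cases hin : i < n
      · cases hmi : mask.testBit i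
        · rfl
        · rw [hmi] at h1
          simp [hin] at h1
      · have hmf : mask.testBit i = false := by
          cases hmb : mask.testBit i
          · rfl
          · exact absurd (pv_testBit_lt_of_lt_two_pow hmaskN hmb) hin
        rw [hmf] at h1
        simp [hin] at h1
    subst hx
    have hxor : (mask ||| s) ^^^ s = mask := by
      apply Nat.eq_of_testBit_eq
      intro i
      rw [Nat.testBit_xor, Nat.testBit_or]
      cases hsi : s.testBit i
      · simp
      · rw [hdisj i hsi]
        simp
    refine ⟨s, hs0, ?_, hsum, ?_⟩
    · rw [pv_submask_iff]
      intro i hi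
      rw [Nat.testBit_or, hi]
      simp
    · rw [hxor]
      exact hm

-- ---- main invariant ----
def InvRM (N : Nat) (prev : List Bool) (reach : List Nat) : Prop :=
  prev.length = N ∧ (∀ x ∈ reach, x < N) ∧ 0 ∈ reach ∧
    ∀ j, j < N → (prev.getD j false = true ↔ j ∈ reach)

lemma pv_step_inv (q : List Int) (c : Int) (prev : List Bool) (reach : PySem.Set Nat)
    (h : InvRM (2 ^ q.length) prev reach) :
    InvRM (2 ^ q.length) (pvRow (pvSums q) c q.length prev)
      (altStep q (2 ^ q.length - 1) c reach) := by
  obtain ⟨hlen, hran, h0, hiff⟩ := h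
  have hpos : 0 < 2 ^ q.length := Nat.two_pow_pos _
  have hfits : ∀ s, (altFits q s c = true) ↔ sumQ q s ≤ c := by
    intro s
    rw [altFits_eq]
    simp
  refine ⟨pvRow_length _ _ _ _, ?_, ?_, ?_⟩
  · intro x hx
    rcases (altStep_mem q (2 ^ q.length - 1) c reach x).mp hx with
      hx' | ⟨mask, hm, s, hs0, hsf, hfit, hxe⟩
    · exact hran x hx'
    · subst hxe
      have hmN := hran mask hm
      apply pv_lt_two_pow_of_bits
      intro i hi
      rw [Nat.testBit_or, Bool.or_eq_true] at hi
      rcases hi with hb | hb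
      · exact pv_testBit_lt_of_lt_two_pow hmN hb
      · have h1 := (pv_submask_iff.mp hsf) i hb
        rw [Nat.testBit_xor, Nat.testBit_two_pow_sub_one] at h1
        by_contra hc
        push_neg at hc
        have hmf : mask.testBit i = false := by
          cases hmb : mask.testBit i
          · rfl
          · exact absurd (pv_testBit_lt_of_lt_two_pow hmN hmb) (by omega)
        rw [hmf] at h1
        simp at h1
        omega
  · exact (altStep_mem _ _ _ _ _).mpr (Or.inl h0)
  · intro j hjN
    rw [pvRow_getD]
    by_cases hj0 : j = 0
    · subst hj0
      rw [if_pos rfl]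
      constructor
      · intro _
        exact (altStep_mem _ _ _ _ _).mpr (Or.inl h0)
      · intro _
        rfl
    · rw [if_neg hj0, if_pos ⟨by omega, hjN⟩, Bool.or_eq_true,
        pvWhile_iff (pvSums q) prev c j j (Nat.and_self j)]
      constructor
      · rintro (hp | ⟨s, hs0, hsm, hle, hsums, hprev⟩)
        · exact (altStep_mem _ _ _ _ _).mpr (Or.inl ((hiff j hjN).mp hp))
        · have hsltN : s < 2 ^ q.length := by
            have := pv_sub_le hsm
            omega
          have hsum : sumQ q s ≤ c := by
            rw [← pvSums_getD q s hsltN]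
            exact hsums
          have hmem : (j ^^^ s) ∈ reach := (hiff _ (pv_xor_lt hjN hsm)).mp hprev
          obtain ⟨mask, hm, s', hs0', hsf', hsum', hx'⟩ :=
            (pv_bridge q c q.length reach hran j hjN).mp ⟨s, hs0, hsm, hsum, hmem⟩
          exact (altStep_mem _ _ _ _ _).mpr
            (Or.inr ⟨mask, hm, s', hs0', hsf', (hfits s').mpr hsum', hx'⟩)
      · intro hx
        rcases (altStep_mem _ _ _ _ _).mp hx with hx' | ⟨mask, hm, s, hs0, hsf, hfit, hxx⟩
        · exact Or.inl ((hiff j hjN).mpr hx')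
        · right
          obtain ⟨s', hs0', hsj', hsum', hmem'⟩ :=
            (pv_bridge q c q.length reach hran j hjN).mpr
              ⟨mask, hm, s, hs0, hsf, (hfits s).mp hfit, hxx⟩
          have hsltN : s' < 2 ^ q.length := by
            have := pv_sub_le hsj'
            omega
          refine ⟨s', hs0', hsj', pv_sub_le hsj', ?_, ?_⟩
          · rw [pvSums_getD q s' hsltN]
            exact hsum'
          · exact (hiff _ (pv_xor_lt hjN hsj')).mpr hmem'

lemma pv_fold_inv (q : List Int) (counts : List Int) :
    ∀ (prev : List Bool) (reach : PySem.Set Nat), InvRM (2 ^ q.length) prev reach →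
      InvRM (2 ^ q.length)
        (counts.foldl (fun prev c => pvRow (pvSums q) c q.length prev) prev)
        (counts.foldl (fun reach c => altStep q (2 ^ q.length - 1) c reach) reach) := by
  intro prev reach h
  induction counts generalizing prev reach with
  | nil => exact h
  | cons c tl ih => exact ih _ _ (pv_step_inv q c prev reach h)

-- ===== VERDICT (by name: the statement is the Claim_ definition above) =====
theorem canDistribute_spec : Claim_equal_canDistribute := by
  unfold Claim_equal_canDistribute Spec_canDistribute
  intro nums quantity _
  have hN : (1:Nat) <<< quantity.length = 2 ^ quantity.length := Nat.one_shiftLeft _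
  have hpos : 0 < 2 ^ quantity.length := Nat.two_pow_pos _
  have hinit : InvRM (2 ^ quantity.length)
      ((List.replicate (1 <<< quantity.length) false).set 0 true)
      (PySem.Set.add PySem.Set.empty 0) := by
    refine ⟨?_, ?_, ?_, ?_⟩
    · rw [List.length_set, List.length_replicate, hN]
    · intro x hx
      rcases (PySem.Set.mem_add _ _ _).mp hx with hmem | hmem
      · simp [PySem.Set.empty] at hmem
      · subst hmem
        exact hpos
    · exact (PySem.Set.mem_add _ _ _).mpr (Or.inr rfl)
    · intro j hj
      by_cases hj0 : j = 0
      · subst hj0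
        rw [pv_getD_set_self _ _ _ _ (by rw [List.length_replicate, hN]; omega)]
        simp [PySem.Set.mem_add]
      · rw [pv_getD_set_ne _ _ _ _ _ (fun h => hj0 h.symm), pv_getD_replicate]
        constructor
        · intro hcontra
          simp at hcontra
        · intro hmem
          rcases (PySem.Set.mem_add _ _ _).mp hmem with hmem | hmem
          · simp [PySem.Set.empty] at hmem
          · exact absurd hmem hj0
  obtain ⟨hlen, hran, h0, hiff⟩ := pv_fold_inv quantity (pvCounts nums) _ _ hinit
  have hfullN : 2 ^ quantity.length - 1 < 2 ^ quantity.length := by omega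
  have hkey := hiff _ hfullN
  rw [hN] at hkey
  have hgoal : ∀ (a b : Bool), (a = true ↔ b = true) → a = b := by decide
  simp only [canDistribute, canDistribute_alt, hN]
  apply hgoal
  rw [hkey, PySem.Set.contains_iff]
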